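-- pv_equiv track=rewrite | github.com/jacksonfellows/euler | python/79_Passcode_derivation.py | conflict
-- ===== SOURCE A (Python) =====
-- def conflict(passcode, login):
--     last_i = 0
--     for x in login:
--         try:
--             i = passcode.index(x)
--             if i < last_i:
--                 return True
--             last_i = i
--         except ValueError:
--             pass
--     return False
-- ===== SOURCE B (Python) =====
-- def conflict(passcode, login):
--     positions = [passcode.index(x) for x in login if x in passcode]
--     return positions != sorted(positions)
-- ===== Notes on version B (the rewrite author's own statement) =====
-- stated objective: simpler
-- what changed: Replaces the incremental running-last-index scan with early return by materializing the list of first-occurrence positions of login chars present in passcode and testing positions != sorted(positions).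
import Mathlib
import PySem

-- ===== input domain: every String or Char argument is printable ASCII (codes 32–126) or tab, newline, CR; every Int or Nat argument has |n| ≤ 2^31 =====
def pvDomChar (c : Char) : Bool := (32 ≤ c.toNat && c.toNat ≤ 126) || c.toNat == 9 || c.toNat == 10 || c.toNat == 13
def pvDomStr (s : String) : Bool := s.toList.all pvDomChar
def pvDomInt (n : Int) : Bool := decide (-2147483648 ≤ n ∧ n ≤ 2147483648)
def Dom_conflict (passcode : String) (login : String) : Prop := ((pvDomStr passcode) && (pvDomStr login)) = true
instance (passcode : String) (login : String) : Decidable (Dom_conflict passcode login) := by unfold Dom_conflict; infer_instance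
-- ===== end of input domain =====

-- B replaces A's running-last-index scan by comparing the first-occurrence position list with its sorted copy (simpler, same cost).

-- ===== PORT A =====
-- the for-loop with early return and the running last_i; index? = passcode.index (none = ValueError, skipped)
def conflictLoop (pc : List Char) (last_i : Nat) : List Char → Bool
  | [] => false
  | x :: xs =>
    match PySem.List.index? pc x with
    | some i => if i < last_i then true else conflictLoop pc i xs
    | none => conflictLoop pc last_i xs

def conflict (passcode : String) (login : String) : Bool :=
  conflictLoop passcode.toList 0 login.toList

-- ===== PORT B =====
-- [passcode.index(x) for x in login if x in passcode] is exactly filterMap index? (index succeeds iff member);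
-- then positions != sorted(positions)
def conflict_alt (passcode : String) (login : String) : Bool :=
  let positions := login.toList.filterMap (PySem.List.index? passcode.toList)
  decide (positions ≠ PySem.List.sorted positions (fun p => p) false)

-- ===== PRECONDITION & SPEC =====
def Spec_conflict (passcode : String) (login : String) (out : Bool) : Prop := out = conflict_alt passcode login
instance (passcode : String) (login : String) (out : Bool) : Decidable (Spec_conflict passcode login out) := by unfold Spec_conflict; infer_instance

-- ===== CLAIM (what is proved, stated in full; the proofs are below) =====
def Claim_equal_conflict : Prop := ∀ (passcode : String) (login : String), Dom_conflict passcode login → Spec_conflict passcode login (conflict passcode login)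

-- ===== LEMMAS AND PROOFS =====

-- A's loop returns true iff the sequence last_i :: positions is not non-decreasing
theorem conflictLoop_eq_decide (pc : List Char) (last_i : Nat) (xs : List Char) :
    conflictLoop pc last_i xs
      = decide (¬ (last_i :: xs.filterMap (PySem.List.index? pc)).Pairwise (fun a b => a ≤ b)) := by
  induction xs generalizing last_i with
  | nil => simp [conflictLoop]
  | cons x xs ih =>
    cases h : PySem.List.index? pc x with
    | none => simp only [conflictLoop, List.filterMap_cons, h]; exact ih last_i
    | some i =>
      simp only [conflictLoop, List.filterMap_cons, h]
      by_cases hlt : i < last_i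
      · have hnp : ¬ (last_i :: i :: xs.filterMap (PySem.List.index? pc)).Pairwise
            (fun a b => a ≤ b) := by
          intro hp
          have := (List.pairwise_cons.mp hp).1 i (by simp)
          omega
        rw [if_pos hlt, eq_comm, decide_eq_true_iff]
        exact hnp
      · rw [if_neg hlt, ih i, decide_eq_decide]
        apply not_congr
        constructor
        · intro hp
          refine List.pairwise_cons.mpr ⟨?_, hp⟩
          intro b hb
          rcases List.mem_cons.mp hb with hb | hb
          · omega
          · have := (List.pairwise_cons.mp hp).1 b hb
            omega
        · exact fun hp => (List.pairwise_cons.mp hp).2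

-- a Nat list equals its sorted copy iff it is non-decreasing
theorem eq_sorted_iff_pairwise (P : List Nat) :
    (P = PySem.List.sorted P (fun p => p) false) ↔ P.Pairwise (fun a b => a ≤ b) := by
  constructor
  · intro h
    have := PySem.List.sorted_pairwise (xs := P) (key := fun p => p)
    rwa [← h] at this
  · intro h
    exact (PySem.List.sorted_eq_self_of_pairwise P (fun p => p) h).symm

-- ===== VERDICT (by name: the statement is the Claim_ definition above) =====
theorem conflict_spec : Claim_equal_conflict := by
  intro passcode login _
  unfold Spec_conflict conflict conflict_alt
  rw [conflictLoop_eq_decide, decide_eq_decide]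
  apply not_congr
  rw [eq_sorted_iff_pairwise]
  constructor
  · exact fun hp => (List.pairwise_cons.mp hp).2
  · exact fun hp => List.pairwise_cons.mpr ⟨fun b _ => Nat.zero_le b, hp⟩
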